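-- pv_equiv track=rewrite | github.com/robinklaassen/aoc2020 | day11/solution.py | _construct_seat_neighbors_v2
-- ===== SOURCE A (Python) =====
-- from typing import List, Dict, Tuple, Optional
--
-- Location = Direction = Tuple[int, int]
--
-- Location = Direction = Tuple[int, int]
--
-- Seats = Dict[Location, bool]
--
-- Neighbors = Dict[Location, List[Location]]
--
-- def _get_directions() -> List[Location]:
--     return [
--         (i, j)
--         for i in (-1, 0, 1)
--         for j in (-1, 0, 1)
--         if i or j
--     ]
--
-- def _construct_seat_neighbors_v2(seats: Seats, grid_size: int) -> Neighbors:
--     return {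
--         loc: [
--             new_loc
--             for dir_ in _get_directions()
--             if (new_loc := _get_next_visible_seat(seats, grid_size, loc, dir_)) is not None
--         ]
--         for loc in seats.keys()
--     }
--
-- def _get_next_visible_seat(seats: Seats,
--                            grid_size: int,
--                            loc: Location,
--                            dir_: Direction) -> Optional[Location]:
--     k = 0
--     while True:
--         k += 1
--         new_loc = loc[0] + k * dir_[0], loc[1] + k * dir_[1]
--
--         # Check for out of bounds
--         if new_loc[0] < 0 or new_loc[0] >= grid_size or new_loc[1] < 0 or new_loc[1] >= grid_size:
--             return None
--
--         if new_loc in seats: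
--             return new_loc
-- ===== SOURCE B (Python) =====
-- def _construct_seat_neighbors_v2(seats, grid_size):
--     # Alternative algorithm: instead of marching cell by cell across the grid,
--     # scan the seat set itself: for each seat and direction, take the minimum
--     # ray distance to another seat, then apply the bounds checks.
--     dirs = [(-1, -1), (-1, 0), (-1, 1), (0, -1), (0, 1), (1, -1), (1, 0), (1, 1)]
--     locs = list(seats)
--
--     def in_grid(a, b):
--         return 0 <= a < grid_size and 0 <= b < grid_size
--
--     def ray_dist(r, c, di, dj, s):
--         sr, sc = s
--         t = (sr - r) * di if di != 0 else (sc - c) * dj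
--         if t >= 1 and sr == r + t * di and sc == c + t * dj:
--             return t
--         return None
--
--     result = {}
--     for r, c in locs:
--         ns = []
--         for di, dj in dirs:
--             if not in_grid(r + di, c + dj):
--                 continue
--             best = None
--             for s in locs:
--                 t = ray_dist(r, c, di, dj, s)
--                 if t is not None and (best is None or t < best):
--                     best = t
--             if best is not None and in_grid(r + best * di, c + best * dj):
--                 ns.append((r + best * di, c + best * dj))
--         result[(r, c)] = ns
--     return result
-- ===== Notes on version B (the rewrite author's own statement) =====
-- stated objective: faster
-- what changed: A marches cell by cell across the grid in each of the 8 directions until it falls off the board or hits a seat; B never walks the grid: for each seat and direction it scans the seat set once, taking the minimum ray distance to another seat on that ray, then applies the two bounds checks, so its cost no longer depends on grid_size.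
import Mathlib
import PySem

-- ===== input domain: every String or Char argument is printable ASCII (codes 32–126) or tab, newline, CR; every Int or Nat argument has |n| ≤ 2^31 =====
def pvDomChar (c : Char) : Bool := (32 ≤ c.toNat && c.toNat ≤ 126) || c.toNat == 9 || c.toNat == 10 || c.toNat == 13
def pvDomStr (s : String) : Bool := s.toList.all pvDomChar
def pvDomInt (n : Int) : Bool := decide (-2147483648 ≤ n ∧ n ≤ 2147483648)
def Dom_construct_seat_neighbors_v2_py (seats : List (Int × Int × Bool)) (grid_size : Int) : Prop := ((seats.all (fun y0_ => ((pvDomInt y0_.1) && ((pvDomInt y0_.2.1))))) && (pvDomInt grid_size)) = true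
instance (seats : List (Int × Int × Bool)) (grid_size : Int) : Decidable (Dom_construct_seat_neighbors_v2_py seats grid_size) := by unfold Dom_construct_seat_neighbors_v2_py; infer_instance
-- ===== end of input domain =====

-- B replaces A's cell-by-cell march across the grid by a minimum-ray-distance scan over
-- the seat set itself (objective: alternative algorithm; cost independent of grid_size).

-- ===== PORT A =====
-- the dict[(int,int), bool] argument arrives flattened as (r, c, b) triples; its key view
-- (first-occurrence order, duplicates dropped = Python dict keys) is all either Python reads.
def pvKeysOf (seats : List (Int × Int × Bool)) : List (Int × Int) :=
  PySem.Set.ofList (seats.map (fun e => (e.1, e.2.1)))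

def pyGetDirections : List (Int × Int) :=
  ([-1, 0, 1] : List Int).flatMap (fun i =>
    ([-1, 0, 1] : List Int).flatMap (fun j =>
      if i ≠ 0 ∨ j ≠ 0 then [(i, j)] else []))

-- A's 'while True' loop. Python terminates because dir_ ≠ (0, 0) eventually pushes a
-- coordinate out of [0, grid_size); fuelA steps always suffice (lemma pvEscape below),
-- so the fuelled recursion computes exactly what the Python loop computes.
def fuelA (g l0 l1 : Int) : Nat := l0.natAbs + l1.natAbs + g.natAbs + 1

def nextVisA (keys : List (Int × Int)) (g l0 l1 d0 d1 : Int) : Nat → Nat → Option (Int × Int)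
  | _, 0 => none
  | k, fuel+1 =>
    let n0 := l0 + ((k : Int) + 1) * d0
    let n1 := l1 + ((k : Int) + 1) * d1
    if n0 < 0 ∨ g ≤ n0 ∨ n1 < 0 ∨ g ≤ n1 then none
    else if (n0, n1) ∈ keys then some (n0, n1)
    else nextVisA keys g l0 l1 d0 d1 (k+1) fuel

def construct_seat_neighbors_v2_py (seats : List (Int × Int × Bool)) (grid_size : Int) : List (Int × Int × List (Int × Int)) :=
  let keys := pvKeysOf seats
  keys.map (fun loc =>
    (loc.1, loc.2,
      pyGetDirections.filterMap (fun d =>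
        nextVisA keys grid_size loc.1 loc.2 d.1 d.2 0 (fuelA grid_size loc.1 loc.2))))

-- ===== PORT B =====
def dirsB : List (Int × Int) := [(-1, -1), (-1, 0), (-1, 1), (0, -1), (0, 1), (1, -1), (1, 0), (1, 1)]

def inGridB (g a b : Int) : Bool := decide (0 ≤ a ∧ a < g ∧ 0 ≤ b ∧ b < g)

def rayDistB (r c di dj : Int) (s : Int × Int) : Option Int :=
  let t : Int := if di ≠ 0 then (s.1 - r) * di else (s.2 - c) * dj
  if 1 ≤ t ∧ s.1 = r + t * di ∧ s.2 = c + t * dj then some t else none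

def bestTB (locs : List (Int × Int)) (r c di dj : Int) : Option Int :=
  locs.foldl (fun best s =>
    match rayDistB r c di dj s with
    | none => best
    | some t =>
      match best with
      | none => some t
      | some b => if t < b then some t else some b) none

def construct_seat_neighbors_v2_py_alt (seats : List (Int × Int × Bool)) (grid_size : Int) : List (Int × Int × List (Int × Int)) :=
  let locs := pvKeysOf seats
  locs.map (fun lc =>
    (lc.1, lc.2,
      dirsB.foldl (fun ns d =>
        if inGridB grid_size (lc.1 + d.1) (lc.2 + d.2) then
          match bestTB locs lc.1 lc.2 d.1 d.2 with
          | none => ns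
          | some t =>
            if inGridB grid_size (lc.1 + t * d.1) (lc.2 + t * d.2) then
              ns ++ [(lc.1 + t * d.1, lc.2 + t * d.2)]
            else ns
        else ns) []))

-- ===== PRECONDITION & SPEC =====
def Spec_construct_seat_neighbors_v2_py (seats : List (Int × Int × Bool)) (grid_size : Int) (out : List (Int × Int × List (Int × Int))) : Prop := out = construct_seat_neighbors_v2_py_alt seats grid_size
instance (seats : List (Int × Int × Bool)) (grid_size : Int) (out : List (Int × Int × List (Int × Int))) : Decidable (Spec_construct_seat_neighbors_v2_py seats grid_size out) := by unfold Spec_construct_seat_neighbors_v2_py; infer_instance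

-- ===== CLAIM (what is proved, stated in full; the proofs are below) =====
def Claim_equal_construct_seat_neighbors_v2_py : Prop := ∀ (seats : List (Int × Int × Bool)) (grid_size : Int), Dom_construct_seat_neighbors_v2_py seats grid_size → Spec_construct_seat_neighbors_v2_py seats grid_size (construct_seat_neighbors_v2_py seats grid_size)

-- ===== LEMMAS AND PROOFS =====

-- B's answer for one seat and one direction, as an Option (proof-side view of B's inner branch)
def visB (keys : List (Int × Int)) (g r c di dj : Int) : Option (Int × Int) :=
  if inGridB g (r + di) (c + dj) then
    match bestTB keys r c di dj with
    | none => none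
    | some t => if inGridB g (r + t * di) (c + t * dj) then some (r + t * di, c + t * dj) else none
  else none

lemma pvGuard_iff (g a b : Int) : (a < 0 ∨ g ≤ a ∨ b < 0 ∨ g ≤ b) ↔ inGridB g a b = false := by
  simp [inGridB]; omega

lemma pvGuard_iff' (g a b : Int) : (¬(a < 0 ∨ g ≤ a ∨ b < 0 ∨ g ≤ b)) ↔ inGridB g a b = true := by
  simp [inGridB]

lemma rayDistB_eq_some_iff (r c di dj : Int) (s : Int × Int) (t : Int)
    (hdi : di = -1 ∨ di = 0 ∨ di = 1) (hdj : dj = -1 ∨ dj = 0 ∨ dj = 1)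
    (hnz : ¬(di = 0 ∧ dj = 0)) :
    rayDistB r c di dj s = some t ↔ 1 ≤ t ∧ s.1 = r + t * di ∧ s.2 = c + t * dj := by
  obtain ⟨s1, s2⟩ := s
  rcases hdi with h|h|h <;> rcases hdj with h'|h'|h' <;> subst h h' <;>
    first
      | exact absurd ⟨rfl, rfl⟩ hnz
      | (simp only [rayDistB]
         split <;> simp_all <;> omega)

lemma bestTB_go_none (r c di dj : Int) :
    ∀ (locs : List (Int × Int)) (acc : Option Int),
      locs.foldl (fun best s =>
        match rayDistB r c di dj s with
        | none => best
        | some t =>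
          match best with
          | none => some t
          | some b => if t < b then some t else some b) acc = none ↔
        (acc = none ∧ ∀ s ∈ locs, rayDistB r c di dj s = none) := by
  intro locs
  induction locs with
  | nil => simp
  | cons s ls ih =>
    intro acc
    simp only [List.foldl_cons]
    cases hr : rayDistB r c di dj s with
    | none => rw [ih]; simp_all
    | some v =>
      cases acc with
      | none => rw [ih]; simp_all
      | some b =>
        rw [ih]
        constructor
        · rintro ⟨h1, -⟩
          rcases ite_eq_iff.mp h1 with ⟨-, h'⟩|⟨-, h'⟩ <;> cases h'
        · rintro ⟨h1, -⟩; simp_all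

lemma bestTB_go_some (r c di dj : Int) :
    ∀ (locs : List (Int × Int)) (acc : Option Int) (t : Int),
      locs.foldl (fun best s =>
        match rayDistB r c di dj s with
        | none => best
        | some t =>
          match best with
          | none => some t
          | some b => if t < b then some t else some b) acc = some t →
      (acc = some t ∨ ∃ s ∈ locs, rayDistB r c di dj s = some t) ∧
        (∀ b, acc = some b → t ≤ b) ∧
        (∀ s ∈ locs, ∀ u, rayDistB r c di dj s = some u → t ≤ u) := by
  intro locs
  induction locs with
  | nil => intro acc t h; simp_all
  | cons s ls ih =>
    intro acc t h
    simp only [List.foldl_cons] at h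
    cases hr : rayDistB r c di dj s with
    | none =>
      simp only [hr] at h
      obtain ⟨hmem, hacc, hls⟩ := ih _ t h
      refine ⟨?_, hacc, ?_⟩
      · rcases hmem with h'|⟨w, hw, hw'⟩
        · exact Or.inl h'
        · exact Or.inr ⟨w, List.mem_cons_of_mem _ hw, hw'⟩
      · intro s' hs' u hu
        rcases List.mem_cons.mp hs' with rfl|hs'
        · rw [hr] at hu; exact absurd hu (by simp)
        · exact hls s' hs' u hu
    | some v =>
      cases acc with
      | none =>
        simp only [hr] at h
        obtain ⟨hmem, hacc, hls⟩ := ih _ t h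
        have htv : t ≤ v := by
          rcases hmem with h'|_
          · injection h' with h'; omega
          · exact hacc v rfl
        refine ⟨?_, by simp, ?_⟩
        · rcases hmem with h'|⟨w, hw, hw'⟩
          · exact Or.inr ⟨s, List.mem_cons_self, by rw [hr, h']⟩
          · exact Or.inr ⟨w, List.mem_cons_of_mem _ hw, hw'⟩
        · intro s' hs' u hu
          rcases List.mem_cons.mp hs' with rfl|hs'
          · rw [hr] at hu; injection hu with hu; omega
          · exact hls s' hs' u hu
      | some b =>
        simp only [hr] at h
        by_cases hlt : v < b
        · rw [if_pos hlt] at h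
          obtain ⟨hmem, hacc, hls⟩ := ih _ t h
          have htv : t ≤ v := by
            rcases hmem with h'|_
            · injection h' with h'; omega
            · exact hacc v rfl
          refine ⟨?_, ?_, ?_⟩
          · rcases hmem with h'|⟨w, hw, hw'⟩
            · exact Or.inr ⟨s, List.mem_cons_self, by rw [hr, h']⟩
            · exact Or.inr ⟨w, List.mem_cons_of_mem _ hw, hw'⟩
          · intro b' hb'; injection hb' with hb'; omega
          · intro s' hs' u hu
            rcases List.mem_cons.mp hs' with rfl|hs'
            · rw [hr] at hu; injection hu with hu; omega
            · exact hls s' hs' u hu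
        · rw [if_neg hlt] at h
          obtain ⟨hmem, hacc, hls⟩ := ih _ t h
          have htb : t ≤ b := by
            rcases hmem with h'|_
            · injection h' with h'; omega
            · exact hacc b rfl
          refine ⟨?_, ?_, ?_⟩
          · rcases hmem with h'|⟨w, hw, hw'⟩
            · exact Or.inl h'
            · exact Or.inr ⟨w, List.mem_cons_of_mem _ hw, hw'⟩
          · intro b' hb'; injection hb' with hb'; omega
          · intro s' hs' u hu
            rcases List.mem_cons.mp hs' with rfl|hs'
            · rw [hr] at hu; injection hu with hu; omega
            · exact hls s' hs' u hu

lemma bestTB_none (keys : List (Int × Int)) (r c di dj : Int)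
    (hdi : di = -1 ∨ di = 0 ∨ di = 1) (hdj : dj = -1 ∨ dj = 0 ∨ dj = 1)
    (hnz : ¬(di = 0 ∧ dj = 0)) (h : bestTB keys r c di dj = none) :
    ∀ t : Int, 1 ≤ t → (r + t * di, c + t * dj) ∉ keys := by
  intro t ht hmem
  obtain ⟨-, hall⟩ := (bestTB_go_none r c di dj keys none).mp h
  have := hall _ hmem
  rw [(rayDistB_eq_some_iff r c di dj _ t hdi hdj hnz).mpr ⟨ht, rfl, rfl⟩] at this
  cases this

lemma bestTB_some (keys : List (Int × Int)) (r c di dj t : Int)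
    (hdi : di = -1 ∨ di = 0 ∨ di = 1) (hdj : dj = -1 ∨ dj = 0 ∨ dj = 1)
    (hnz : ¬(di = 0 ∧ dj = 0)) (h : bestTB keys r c di dj = some t) :
    (1 ≤ t ∧ (r + t * di, c + t * dj) ∈ keys) ∧
      ∀ u : Int, 1 ≤ u → (r + u * di, c + u * dj) ∈ keys → t ≤ u := by
  obtain ⟨hmem, -, hls⟩ := bestTB_go_some r c di dj keys none t h
  rcases hmem with h'|⟨w, hw, hw'⟩
  · cases h'
  · obtain ⟨ht1, hw1, hw2⟩ := (rayDistB_eq_some_iff r c di dj w t hdi hdj hnz).mp hw'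
    refine ⟨⟨ht1, ?_⟩, ?_⟩
    · have : w = (r + t * di, c + t * dj) := Prod.ext hw1 hw2
      rwa [this] at hw
    · intro u hu humem
      exact hls _ humem u ((rayDistB_eq_some_iff r c di dj _ u hdi hdj hnz).mpr ⟨hu, rfl, rfl⟩)

lemma pvConvex (g r c di dj t j : Int)
    (hdi : di = -1 ∨ di = 0 ∨ di = 1) (hdj : dj = -1 ∨ dj = 0 ∨ dj = 1)
    (h1 : inGridB g (r + di) (c + dj) = true) (ht : inGridB g (r + t * di) (c + t * dj) = true)
    (hj1 : 1 ≤ j) (hjt : j ≤ t) : inGridB g (r + j * di) (c + j * dj) = true := by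
  rcases hdi with h|h|h <;> rcases hdj with h'|h'|h' <;> subst h h' <;>
    simp only [inGridB, decide_eq_true_eq] at * <;> omega

lemma pvEscape (g r c di dj : Int)
    (hdi : di = -1 ∨ di = 0 ∨ di = 1) (hdj : dj = -1 ∨ dj = 0 ∨ dj = 1)
    (hnz : ¬(di = 0 ∧ dj = 0)) :
    ∃ j : Int, 0 < j ∧ j ≤ (fuelA g r c : Int) ∧ inGridB g (r + j * di) (c + j * dj) = false := by
  rcases hdi with h|h|h <;> rcases hdj with h'|h'|h' <;> subst h h' <;>
    first
      | exact absurd ⟨rfl, rfl⟩ hnz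
      | (refine ⟨(r.natAbs : Int) + (g.natAbs : Int) + 1, by omega, by unfold fuelA; omega, ?_⟩
         simp only [inGridB, decide_eq_false_iff_not]; omega)
      | (refine ⟨(c.natAbs : Int) + (g.natAbs : Int) + 1, by omega, by unfold fuelA; omega, ?_⟩
         simp only [inGridB, decide_eq_false_iff_not]; omega)

lemma nextVisA_loop (keys : List (Int × Int)) (g r c di dj : Int)
    (hdi : di = -1 ∨ di = 0 ∨ di = 1) (hdj : dj = -1 ∨ dj = 0 ∨ dj = 1)
    (hnz : ¬(di = 0 ∧ dj = 0)) :
    ∀ (fuel k : Nat),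
      (∀ j : Int, 1 ≤ j → j ≤ (k : Int) → ((r + j * di, c + j * dj) ∉ keys ∧ inGridB g (r + j * di) (c + j * dj) = true)) →
      (∃ j : Int, (k : Int) < j ∧ j ≤ (k : Int) + (fuel : Int) ∧ inGridB g (r + j * di) (c + j * dj) = false) →
      nextVisA keys g r c di dj k fuel = visB keys g r c di dj := by
  intro fuel
  induction fuel with
  | zero =>
    intro k _ hfuel
    obtain ⟨j, hj1, hj2, -⟩ := hfuel
    exact absurd hj2 (by push_cast; omega)
  | succ fuel ih =>
    intro k hno hfuel
    simp only [nextVisA]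
    by_cases hg : (r + ((k : Int) + 1) * di < 0 ∨ g ≤ r + ((k : Int) + 1) * di ∨
        c + ((k : Int) + 1) * dj < 0 ∨ g ≤ c + ((k : Int) + 1) * dj)
    · rw [if_pos hg]
      have hK : inGridB g (r + ((k : Int) + 1) * di) (c + ((k : Int) + 1) * dj) = false :=
        (pvGuard_iff _ _ _).mp hg
      unfold visB
      by_cases h1 : inGridB g (r + di) (c + dj) = true
      · rw [if_pos h1]
        cases hb : bestTB keys r c di dj with
        | none => rfl
        | some t =>
          obtain ⟨⟨ht1, htm⟩, hmin⟩ := bestTB_some keys r c di dj t hdi hdj hnz hb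
          have htk : (k : Int) + 1 ≤ t := by
            by_contra hc
            exact (hno t ht1 (by omega)).1 htm
          have htg : inGridB g (r + t * di) (c + t * dj) = false := by
            cases hgt : inGridB g (r + t * di) (c + t * dj)
            · rfl
            · have := pvConvex g r c di dj t ((k : Int) + 1) hdi hdj (by simpa using h1) hgt
                (by omega) htk
              rw [this] at hK; cases hK
          simp [htg]
      · rw [if_neg h1]
    · rw [if_neg hg]
      have hKin : inGridB g (r + ((k : Int) + 1) * di) (c + ((k : Int) + 1) * dj) = true :=
        (pvGuard_iff' _ _ _).mp hg
      by_cases hmem : (r + ((k : Int) + 1) * di, c + ((k : Int) + 1) * dj) ∈ keys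
      · rw [if_pos hmem]
        have h1 : inGridB g (r + di) (c + dj) = true := by
          cases k with
          | zero => simpa using hKin
          | succ k' => simpa using (hno 1 le_rfl (by push_cast; omega)).2
        cases hb : bestTB keys r c di dj with
        | none =>
          exact absurd hmem (bestTB_none keys r c di dj hdi hdj hnz hb ((k : Int) + 1) (by omega))
        | some t =>
          obtain ⟨⟨ht1, htm⟩, hmin⟩ := bestTB_some keys r c di dj t hdi hdj hnz hb
          have hle : t ≤ (k : Int) + 1 := hmin ((k : Int) + 1) (by omega) hmem
          have hge : (k : Int) + 1 ≤ t := by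
            by_contra hc
            exact (hno t ht1 (by omega)).1 htm
          have ht : t = (k : Int) + 1 := le_antisymm hle hge
          subst ht
          unfold visB
          rw [if_pos h1]
          simp [hb, hKin]
      · rw [if_neg hmem]
        apply ih
        · intro j hj1 hjk
          have hsplit : j ≤ (k : Int) ∨ j = (k : Int) + 1 := by push_cast at hjk; omega
          rcases hsplit with h'|h'
          · exact hno j hj1 h'
          · subst h'; exact ⟨hmem, hKin⟩
        · obtain ⟨j, hja, hjb, hjc⟩ := hfuel
          refine ⟨j, ?_, ?_, hjc⟩
          · have hne : j ≠ (k : Int) + 1 := by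
              intro h'
              rw [h'] at hjc; rw [hjc] at hKin; cases hKin
            push_cast; omega
          · push_cast at hjb ⊢; omega

lemma nextVisA_eq (keys : List (Int × Int)) (g r c di dj : Int)
    (hdi : di = -1 ∨ di = 0 ∨ di = 1) (hdj : dj = -1 ∨ dj = 0 ∨ dj = 1)
    (hnz : ¬(di = 0 ∧ dj = 0)) :
    nextVisA keys g r c di dj 0 (fuelA g r c) = visB keys g r c di dj := by
  refine nextVisA_loop keys g r c di dj hdi hdj hnz (fuelA g r c) 0 (fun j hj1 hj0 => absurd (le_trans hj1 hj0) (by norm_num)) ?_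
  obtain ⟨j, h1, h2, h3⟩ := pvEscape g r c di dj hdi hdj hnz
  exact ⟨j, by exact_mod_cast h1, by push_cast; omega, h3⟩

lemma inner_eq (keys : List (Int × Int)) (g r c : Int) :
    pyGetDirections.filterMap (fun d => nextVisA keys g r c d.1 d.2 0 (fuelA g r c)) =
      dirsB.foldl (fun ns d =>
        if inGridB g (r + d.1) (c + d.2) then
          match bestTB keys r c d.1 d.2 with
          | none => ns
          | some t =>
            if inGridB g (r + t * d.1) (c + t * d.2) then
              ns ++ [(r + t * d.1, c + t * d.2)]
            else ns
        else ns) [] := by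
  have hstep : ∀ (ns : List (Int × Int)) (d : Int × Int),
      (if inGridB g (r + d.1) (c + d.2) then
        match bestTB keys r c d.1 d.2 with
        | none => ns
        | some t =>
          if inGridB g (r + t * d.1) (c + t * d.2) then
            ns ++ [(r + t * d.1, c + t * d.2)]
          else ns
      else ns) = ns ++ (visB keys g r c d.1 d.2).toList := by
    intro ns d
    unfold visB
    by_cases h1 : inGridB g (r + d.1) (c + d.2) = true
    · rw [if_pos h1, if_pos h1]
      cases hb : bestTB keys r c d.1 d.2 with
      | none => simp
      | some t =>
        by_cases h2 : inGridB g (r + t * d.1) (c + t * d.2) = true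
        · simp [h2]
        · simp [h2]
    · rw [if_neg h1, if_neg h1]; simp
  rw [PySem.List.foldl_congr_mem dirsB _ (fun ns d => ns ++ (visB keys g r c d.1 d.2).toList) []
      (fun ns d _ => hstep ns d)]
  rw [PySem.List.foldl_append_eq_flatMap, List.nil_append]
  have hdirs : pyGetDirections = dirsB := by decide
  rw [hdirs, List.filterMap_eq_flatMap_toList]
  refine List.flatMap_congr (fun d hd => ?_)
  have hd' : (d.1 = -1 ∨ d.1 = 0 ∨ d.1 = 1) ∧ (d.2 = -1 ∨ d.2 = 0 ∨ d.2 = 1) ∧ ¬(d.1 = 0 ∧ d.2 = 0) := by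
    fin_cases hd <;> simp
  exact congrArg Option.toList
    (nextVisA_eq keys g r c d.1 d.2 hd'.1 hd'.2.1 hd'.2.2)

lemma ports_eq (seats : List (Int × Int × Bool)) (grid_size : Int) :
    construct_seat_neighbors_v2_py seats grid_size = construct_seat_neighbors_v2_py_alt seats grid_size := by
  unfold construct_seat_neighbors_v2_py construct_seat_neighbors_v2_py_alt
  exact List.map_congr_left (fun lc _ => by
    exact congrArg (fun L => (lc.1, lc.2, L)) (inner_eq (pvKeysOf seats) grid_size lc.1 lc.2))

-- ===== VERDICT (by name: the statement is the Claim_ definition above) =====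
theorem construct_seat_neighbors_v2_py_spec : Claim_equal_construct_seat_neighbors_v2_py := by
  intro seats grid_size _
  unfold Spec_construct_seat_neighbors_v2_py
  exact ports_eq seats grid_size
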